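-- pv_equiv track=rewrite | github.com/LimJih00n/CODE_TEST | 250317/K개 중에 1개를 N번 뽑기/n-permutations-of-k-with-repetition.py | gen_p
-- ===== SOURCE A (Python) =====
-- def gen_p(elements,r):
--     re = []
--
--     def dfs(path):
--
--         if len(path) == r:
--             re.append(path[:])
--             return
--
--         for i in range(len(elements)):
--
--
--             path.append(elements[i])
--             dfs(path)
--             path.pop()
--     dfs([])
--     return re
-- ===== SOURCE B (Python) =====
-- def gen_p(elements, r):
--     results = [[]]
--     for _ in range(r):
--         results = [path + [e] for path in results for e in elements]
--     return results
-- ===== Notes on version B (the rewrite author's own statement) =====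
-- stated objective: simpler
-- what changed: Replaces the recursive DFS with an explicit path/backtracking over a mutable list by an iterative bottom-up layer expansion: start from [[]] and extend every partial sequence by every element, r times.
-- outside the precondition, e.g. on gen_p([], -1): A returns [], B returns [[]]
import Mathlib
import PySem

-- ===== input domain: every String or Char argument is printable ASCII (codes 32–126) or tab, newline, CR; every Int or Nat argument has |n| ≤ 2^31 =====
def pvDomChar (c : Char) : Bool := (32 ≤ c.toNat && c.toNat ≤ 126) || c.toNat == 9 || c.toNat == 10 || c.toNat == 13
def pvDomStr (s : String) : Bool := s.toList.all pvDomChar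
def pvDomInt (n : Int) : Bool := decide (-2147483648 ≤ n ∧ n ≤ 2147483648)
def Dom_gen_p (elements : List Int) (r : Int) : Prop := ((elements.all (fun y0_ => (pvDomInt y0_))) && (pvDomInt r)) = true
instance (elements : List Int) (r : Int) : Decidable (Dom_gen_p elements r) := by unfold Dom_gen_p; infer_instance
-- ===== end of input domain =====

-- B replaces A's recursive DFS/backtracking by iterative bottom-up layer expansion (simpler decomposition, same cost).


-- ===== PORT A =====
-- A's inner dfs: append to `re` a copy of path when len(path) == r, else loop over elements,
-- push, recurse, pop.  The `r ≤ path.length` guard only makes the recursion total (that case is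
-- unreachable under Pre_: Python diverges there).
def gen_p_dfs (elements : List Int) (r : Int) (path : List Int) : List (List Int) :=
  if (path.length : Int) = r then [path]
  else if r ≤ (path.length : Int) then []
  else elements.flatMap (fun e => gen_p_dfs elements r (path ++ [e]))
termination_by (r - path.length).toNat
decreasing_by
  simp only [List.length_append, List.length_cons, List.length_nil]
  omega

def gen_p (elements : List Int) (r : Int) : List (List Int) :=
  gen_p_dfs elements r []

-- ===== PORT B =====
def gen_p_alt (elements : List Int) (r : Int) : List (List Int) :=
  (PySem.List.pyRange 0 r 1).foldl
    (fun results _ => results.flatMap (fun path => elements.map (fun e => path ++ [e])))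
    [[]]

-- ===== PRECONDITION & SPEC =====
-- Pre_ excludes negative r, outside the function's natural domain: there A infinitely recurses
-- (RecursionError) for nonempty elements, and for empty elements A's [] vs B's [[]] is an
-- unspecified corner (neither value is more defensible).
def Pre_gen_p (elements : List Int) (r : Int) : Prop := 0 ≤ r
instance (elements : List Int) (r : Int) : Decidable (Pre_gen_p elements r) := by unfold Pre_gen_p; infer_instance
def pvWitness_gen_p : List Int × Int := ([1, 2], 2)

def Spec_gen_p (elements : List Int) (r : Int) (out : List (List Int)) : Prop := out = gen_p_alt elements r
instance (elements : List Int) (r : Int) (out : List (List Int)) : Decidable (Spec_gen_p elements r out) := by unfold Spec_gen_p; infer_instance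

-- ===== CLAIM (what is proved, stated in full; the proofs are below) =====
def Claim_equal_gen_p : Prop := ∀ (elements : List Int) (r : Int), Dom_gen_p elements r → Pre_gen_p elements r → Spec_gen_p elements r (gen_p elements r)

-- ===== LEMMAS AND PROOFS =====

-- one layer of B's expansion
def pvStep (elements : List Int) (rs : List (List Int)) : List (List Int) :=
  rs.flatMap (fun path => elements.map (fun e => path ++ [e]))

theorem pvStep_append (elements : List Int) (a b : List (List Int)) :
    pvStep elements (a ++ b) = pvStep elements a ++ pvStep elements b := by
  simp [pvStep]

theorem pvStep_iter_append (elements : List Int) (n : Nat) (a b : List (List Int)) :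
    (pvStep elements)^[n] (a ++ b) = (pvStep elements)^[n] a ++ (pvStep elements)^[n] b := by
  induction n generalizing a b with
  | zero => simp
  | succ n ih =>
    simp only [Function.iterate_succ_apply, pvStep_append, ih]

theorem pvStep_iter_flatMap (elements : List Int) (n : Nat) (l : List (List Int)) :
    (pvStep elements)^[n] l = l.flatMap (fun p => (pvStep elements)^[n] [p]) := by
  induction l with
  | nil =>
    have : ([] : List (List Int)) = [] ++ [] := rfl
    simp only [List.flatMap_nil]
    induction n with
    | zero => rfl
    | succ n ih => simp only [Function.iterate_succ_apply, pvStep, List.flatMap_nil, ih]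
  | cons p rest ih =>
    have h : p :: rest = [p] ++ rest := rfl
    rw [h, pvStep_iter_append, ih]
    simp

theorem gen_p_dfs_eq_iter (elements : List Int) (r : Int) (n : Nat) (path : List Int)
    (h : (path.length : Int) + n = r) :
    gen_p_dfs elements r path = (pvStep elements)^[n] [path] := by
  induction n generalizing path with
  | zero =>
    rw [gen_p_dfs]
    simp only [Nat.cast_zero, add_zero] at h
    simp [h]
  | succ n ih =>
    rw [gen_p_dfs]
    have h1 : (path.length : Int) ≠ r := by push_cast at h ⊢; omega
    have h2 : ¬ r ≤ (path.length : Int) := by push_cast at h ⊢; omega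
    simp only [h1, h2, if_false]
    have step : ∀ e : Int, gen_p_dfs elements r (path ++ [e]) = (pvStep elements)^[n] [path ++ [e]] := by
      intro e
      apply ih
      simp only [List.length_append, List.length_cons, List.length_nil]
      push_cast at h ⊢; omega
    calc elements.flatMap (fun e => gen_p_dfs elements r (path ++ [e]))
        = elements.flatMap (fun e => (pvStep elements)^[n] [path ++ [e]]) := by
          simp only [step]
      _ = (pvStep elements)^[n] (elements.map (fun e => path ++ [e])) := by
          rw [pvStep_iter_flatMap elements n (elements.map (fun e => path ++ [e])),
            List.flatMap_map]
      _ = (pvStep elements)^[n] (pvStep elements [path]) := by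
          simp [pvStep]
      _ = (pvStep elements)^[n+1] [path] := by
          rw [Function.iterate_succ_apply]

theorem foldl_const_iter (elements : List Int) (l : List Int) (init : List (List Int)) :
    l.foldl (fun results _ => pvStep elements results) init = (pvStep elements)^[l.length] init := by
  induction l generalizing init with
  | nil => rfl
  | cons x xs ih =>
    simp only [List.foldl_cons, List.length_cons, ih, Function.iterate_succ_apply]

-- ===== VERDICT (by name: the statement is the Claim_ definition above) =====
theorem gen_p_spec : Claim_equal_gen_p := by
  intro elements r _ hr
  unfold Pre_gen_p at hr
  unfold Spec_gen_p gen_p gen_p_alt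
  have hlen : (PySem.List.pyRange 0 r 1).length = r.toNat := by
    rw [PySem.List.length_pyRange_one]; omega
  have : (PySem.List.pyRange 0 r 1).foldl
      (fun results _ => results.flatMap (fun path => elements.map (fun e => path ++ [e]))) [[]]
      = (pvStep elements)^[r.toNat] [[]] := by
    rw [← hlen]
    exact foldl_const_iter elements _ _
  rw [this]
  apply gen_p_dfs_eq_iter
  simp only [List.length_nil, Nat.cast_zero, zero_add]
  omega
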